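-- pv_equiv track=rewrite | github.com/miliar/Code_Jam_Webscraper | Solutions_python/Problem_155/1829.py | get_output
-- ===== SOURCE A (Python) =====
-- def get_output(case, string):
--     friend = 0
--     people = 0
--     config = string.split()
--     for i in range(int(config[0])):
--         people += int (config[1][i])
--         if people < i + 1:
--             friend += i + 1 - people
--             people += i + 1 - people
--     return "Case #%d: %d\n" %(case, friend)
-- ===== SOURCE B (Python) =====
-- def get_output(case, string):
--     config = string.split()
--     prefixes = []
--     total = 0
--     for i in range(int(config[0])):
--         total += int(config[1][i])
--         prefixes.append(total)
--     need = max([0] + [i + 1 - p for i, p in enumerate(prefixes)])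
--     return "Case #%d: %d\n" % (case, need)
-- ===== Notes on version B (the rewrite author's own statement) =====
-- stated objective: alternative
-- what changed: Replaces A's feedback simulation (adding recruited friends back into the running audience inside a branch) by a two-pass computation: build the plain prefix sums of the digits, then take the maximum deficit max(0, max_i(i+1 - prefix_{i+1})) as the friend count.
import Mathlib
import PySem

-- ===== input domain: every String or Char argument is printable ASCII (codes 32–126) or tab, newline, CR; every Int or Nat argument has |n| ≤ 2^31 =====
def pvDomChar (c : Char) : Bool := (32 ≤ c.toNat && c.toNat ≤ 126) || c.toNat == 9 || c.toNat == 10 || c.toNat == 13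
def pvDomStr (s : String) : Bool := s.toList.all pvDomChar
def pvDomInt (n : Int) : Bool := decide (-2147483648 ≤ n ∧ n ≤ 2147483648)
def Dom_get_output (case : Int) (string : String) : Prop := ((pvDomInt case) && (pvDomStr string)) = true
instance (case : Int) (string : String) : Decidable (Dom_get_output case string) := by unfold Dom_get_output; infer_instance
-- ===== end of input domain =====

-- B replaces A's feedback simulation (recruited friends fed back into the running audience inside a
-- branch) by a two-pass computation: plain prefix sums of the digits, then the maximum deficit
-- max(0, max_i (i+1 - prefix_{i+1})) is the friend count; same cost, no feedback mutation.

-- ===== PORT A =====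
-- shared parsing helpers (both Pythons compute config = string.split(), int(config[0]), int(config[1][i]) identically)
def pvConfig (string : String) : List String := PySem.Str.split₀ string
def pvN (string : String) : Int := (PySem.Int.ofStr? (PySem.List.pyGetD (pvConfig string) 0 "")).getD 0
def pvDigit (string : String) (i : Int) : Int :=
  (PySem.Int.ofChars? [(PySem.Str.pyGet? (PySem.List.pyGetD (pvConfig string) 1 "") i).getD ' ']).getD 0

-- A's loop body: add the digit to `people`; if short of i+1, recruit the deficit and add it back in
def pvStepA (string : String) (st : Int × Int) (i : Int) : Int × Int :=
  if st.2 + pvDigit string i < i + 1 then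
    (st.1 + (i + 1 - (st.2 + pvDigit string i)),
     st.2 + pvDigit string i + (i + 1 - (st.2 + pvDigit string i)))
  else (st.1, st.2 + pvDigit string i)

def get_output (case : Int) (string : String) : String :=
  "Case #" ++ PySem.Int.toStr case ++ ": " ++
    PySem.Int.toStr ((PySem.List.pyRange 0 (pvN string) 1).foldl (pvStepA string) (0, 0)).1 ++ "\n"

-- ===== PORT B =====
-- B's first-pass loop body: append the running total to the prefix list
def pvStepB (string : String) (acc : List Int × Int) (i : Int) : List Int × Int :=
  (acc.1 ++ [acc.2 + pvDigit string i], acc.2 + pvDigit string i)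

def get_output_alt (case : Int) (string : String) : String :=
  "Case #" ++ PySem.Int.toStr case ++ ": " ++
    PySem.Int.toStr
      ((PySem.List.max?
          ((0 : Int) ::
            (PySem.List.enumerate
                ((PySem.List.pyRange 0 (pvN string) 1).foldl (pvStepB string) ([], 0)).1 0).map
              (fun ip => ip.1 + 1 - ip.2))
          (fun y => y)).getD 0) ++ "\n"

-- ===== PRECONDITION & SPEC =====
-- Pre_ excludes exactly the inputs on which the Python A raises: no token at all / int(config[0])
-- fails (ValueError/IndexError), or the loop runs and config[1] is missing, too short, or holds a
-- non-digit among its first n characters (IndexError/ValueError).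
def Pre_get_output (case : Int) (string : String) : Prop :=
  pvConfig string ≠ [] ∧
  (PySem.Int.ofStr? (PySem.List.pyGetD (pvConfig string) 0 "")).isSome ∧
  (pvN string ≤ 0 ∨
    (2 ≤ (pvConfig string).length ∧
     pvN string ≤ ((PySem.List.pyGetD (pvConfig string) 1 "").toList.length : Int) ∧
     ((PySem.List.pyGetD (pvConfig string) 1 "").toList.take (pvN string).toNat).all Char.isDigit))
instance (case : Int) (string : String) : Decidable (Pre_get_output case string) := by
  unfold Pre_get_output; infer_instance
def pvWitness_get_output : Int × String := (7, "5 11001")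

def Spec_get_output (case : Int) (string : String) (out : String) : Prop := out = get_output_alt case string
instance (case : Int) (string : String) (out : String) : Decidable (Spec_get_output case string out) := by unfold Spec_get_output; infer_instance

-- ===== CLAIM (what is proved, stated in full; the proofs are below) =====
def Claim_equal_get_output : Prop := ∀ (case : Int) (string : String), Dom_get_output case string → Pre_get_output case string → Spec_get_output case string (get_output case string)

-- ===== LEMMAS AND PROOFS =====

-- proof-only abbreviation: the friend count B's second pass computes for the first m digits
def pvNeed (string : String) (m : Nat) : Int :=
  ((PySem.List.enumerate
      ((PySem.List.pyRange 0 (m : Int) 1).foldl (pvStepB string) ([], 0)).1 0).map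
    (fun ip => ip.1 + 1 - ip.2)).foldl max 0

-- invariant: A's state after m steps is (need, prefix + need), where need is B's max deficit
lemma pv_loop_main (string : String) (m : Nat) :
    (PySem.List.pyRange 0 (m : Int) 1).foldl (pvStepA string) (0, 0)
      = (pvNeed string m,
         ((PySem.List.pyRange 0 (m : Int) 1).foldl (pvStepB string) ([], 0)).2 + pvNeed string m)
    ∧ ((PySem.List.pyRange 0 (m : Int) 1).foldl (pvStepB string) ([], 0)).1.length = m := by
  induction m with
  | zero =>
    simp only [Nat.cast_zero]
    rw [PySem.List.pyRange_one_eq_nil (le_refl 0)]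
    simp [pvNeed, PySem.List.pyRange_one_eq_nil (le_refl 0)]
  | succ m ih =>
    obtain ⟨ih1, ih2⟩ := ih
    have hcast : ((m + 1 : Nat) : Int) = (m : Int) + 1 := by push_cast; ring
    have hrange : PySem.List.pyRange 0 ((m + 1 : Nat) : Int) 1
        = PySem.List.pyRange 0 (m : Int) 1 ++ [(m : Int)] := by
      rw [hcast, PySem.List.pyRange_one_succ_right (by positivity)]
    have hneed : pvNeed string (m + 1)
        = max (pvNeed string m)
            ((m : Int) + 1
              - (((PySem.List.pyRange 0 (m : Int) 1).foldl (pvStepB string) ([], 0)).2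
                 + pvDigit string m)) := by
      unfold pvNeed
      rw [hrange, List.foldl_append]
      simp only [List.foldl_cons, List.foldl_nil]
      rw [pvStepB, PySem.List.enumerate_append, ih2]
      simp [PySem.List.enumerate]
    rw [hrange, List.foldl_append, List.foldl_append]
    simp only [List.foldl_cons, List.foldl_nil]
    rw [ih1, hneed]
    refine ⟨?_, by simp [pvStepB, ih2]⟩
    rw [pvStepA, pvStepB]
    split_ifs with h <;> simp only [Prod.mk.injEq] <;> constructor <;> omega

-- ===== VERDICT (by name: the statement is the Claim_ definition above) =====
theorem get_output_spec : Claim_equal_get_output := by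
  intro _case string _ _
  unfold Spec_get_output get_output get_output_alt
  rw [PySem.List.max?_id_cons]
  rcases le_or_gt (pvN string) 0 with h | h
  · rw [PySem.List.pyRange_one_eq_nil h]
    simp
  · have hm : pvN string = ((pvN string).toNat : Int) := by omega
    rw [hm]
    rw [(pv_loop_main string (pvN string).toNat).1]
    simp [pvNeed]
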